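-- pv_equiv track=rewrite | github.com/ows-cloud/apps | multicompany_base/models/multicompany_security.py | _recursive_order_words
-- ===== SOURCE A (Python) =====
-- def _recursive_order_words(words_list):
--     words_sub_list = {}
--     parenthesis_counter = 0
--     operator = ''
--     last_operator = ''
--     for word in words_list:
--         if word == '(':
--             if parenthesis_counter > 0:
--                 words_sub_list[parenthesis_counter].append(word)
--             parenthesis_counter += 1
--         elif word == ')':
--             parenthesis_counter -= 1
--             if parenthesis_counter > 0:
--                 words_sub_list[parenthesis_counter].append(word)
--             else:
--                 words_sub_list.setdefault(parenthesis_counter, []).append(_recursive_order_words(words_sub_list[1]))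
--                 words_sub_list[1] = []
--                 last_operator = ''
--         else:
--             if word in ('AND', 'OR'):
--                 operator = word
--                 assert (operator == last_operator) or (not last_operator)
--             words_sub_list.setdefault(parenthesis_counter, []).append(word)
--     words_sub_dict = {}
--     for count, word in enumerate(words_sub_list[0]):
--         if count % 2 == 0:
--             words_sub_dict[count+1] = word
--         else:
--             words_sub_dict[count-1] = word
--     ordered_words_list = []
--     for count in range(0, len(words_sub_dict) + 1):
--         if count in words_sub_dict:
--             if type(words_sub_dict[count]) is list:
--                 ordered_words_list.extend(words_sub_dict[count])
--             else:
--                 ordered_words_list.append(words_sub_dict[count])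
--     return ordered_words_list
-- ===== SOURCE B (Python) =====
-- def _swap_pairs(xs):
--     # consume two elements at a time, emitting each pair swapped; a leftover last element stays put
--     out = []
--     i = 0
--     while i + 1 < len(xs):
--         out.append(xs[i + 1])
--         out.append(xs[i])
--         i += 2
--     if i < len(xs):
--         out.append(xs[i])
--     return out
--
--
-- def _flatten_pairs(items):
--     # pairwise-swap an item list and flatten: sublist items are spliced in, words kept as is
--     out = []
--     for item in _swap_pairs(items):
--         if type(item) is list:
--             out.extend(item)
--         else:
--             out.append(item)
--     return out
--
--
-- def _recursive_order_words(words_list):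
--     # one pass with an explicit stack of per-level frames instead of a depth-keyed
--     # dict of buffers plus recursion: '(' pushes a fresh frame, ')' pops the frame
--     # and emits its reordered, flattened token list as one item of the parent frame
--     stack = [[]]
--     for word in words_list:
--         if word == '(':
--             stack.append([])
--         elif word == ')':
--             group = stack.pop()
--             stack[-1].append(_flatten_pairs(group))
--         else:
--             stack[-1].append(word)
--     return _flatten_pairs(stack[0])
-- ===== Notes on version B (the rewrite author's own statement) =====
-- stated objective: simpler
-- what changed: Replaces A's recursion plus depth-keyed dict of buffers and the enumerate/dict/range reordering pass with a single non-recursive scan over an explicit stack of per-level frames ('(' pushes a frame, ')' pops it and splices its pair-swapped flattened tokens into the parent) and a direct adjacent-pair-swap helper; Pre_ is exactly the set of inputs on which A returns (A raises KeyError/IndexError on all others: stray ')', empty or nested groups closed back to top level, '(' at a depth whose buffer was never created, and inputs with no completed top-level token).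
import Mathlib
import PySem

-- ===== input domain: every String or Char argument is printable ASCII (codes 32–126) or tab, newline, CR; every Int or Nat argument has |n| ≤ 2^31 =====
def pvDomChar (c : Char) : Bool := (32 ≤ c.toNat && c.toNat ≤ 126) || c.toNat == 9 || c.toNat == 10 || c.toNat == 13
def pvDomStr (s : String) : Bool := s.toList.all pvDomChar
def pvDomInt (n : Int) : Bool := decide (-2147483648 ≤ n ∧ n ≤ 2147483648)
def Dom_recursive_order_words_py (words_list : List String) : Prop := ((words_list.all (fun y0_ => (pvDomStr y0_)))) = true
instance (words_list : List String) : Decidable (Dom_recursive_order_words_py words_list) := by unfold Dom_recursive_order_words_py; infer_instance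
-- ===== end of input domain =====

-- B replaces A's recursion + depth-keyed dict of buffers + enumerate/dict/range reordering pass by one
-- non-recursive scan over an explicit stack of per-level frames and a direct pair-swap helper
-- (objective: simpler); equivalence is proved on Pre_, which is exactly the set of inputs on which
-- the Python A returns a value (it raises KeyError/IndexError on all others).

-- ===== PORT A =====

-- a top-level item is either a word or the (already reordered) word list of a closed group
abbrev RowItem := String ⊕ List String

-- Python `words_sub_list[k].append(v)` and `words_sub_list.setdefault(k, []).append(v)`.
-- The former raises KeyError on a missing key (those inputs are outside Pre_); the port creates the key.
def rowDappend (d : PySem.Dict Int (List RowItem)) (k : Int) (v : RowItem) : PySem.Dict Int (List RowItem) :=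
  d.insert k (((d.get? k).getD []) ++ [v])

-- entries stored under the positive keys are always words (Sum.inl); `.inr` is unreachable there
def rowItemStr : RowItem → String
  | .inl s => s
  | .inr _ => ""

-- the loop body of A; `rec` is the recursive call `_recursive_order_words`
def rowStepA (rec : List String → List String)
    (st : PySem.Dict Int (List RowItem) × Int × String × String) (w : String) :
    PySem.Dict Int (List RowItem) × Int × String × String :=
  let (d, pc, op, lop) := st
  if w = "(" then
    ((if pc > 0 then rowDappend d pc (.inl w) else d), pc + 1, op, lop)
  else if w = ")" then
    let pc := pc - 1
    if pc > 0 then (rowDappend d pc (.inl w), pc, op, lop)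
    else
      -- `words_sub_list[1]` (KeyError when absent: outside Pre_); its entries are words, see rowItemStr
      let sub := rec (((d.get? 1).getD []).map rowItemStr)
      ((rowDappend d pc (.inr sub)).insert 1 [], pc, op, "")
  else
    let op := if w = "AND" ∨ w = "OR" then w else op
    -- Python's `assert (operator == last_operator) or (not last_operator)` cannot fire:
    -- last_operator is only ever '' at this point, so the assert is a no-op
    (rowDappend d pc (.inl w), pc, op, lop)

-- the two trailing loops of A: build words_sub_dict from enumerate(words_sub_list[0]) and
-- emit over range(0, len(words_sub_dict) + 1)
def rowEmitA (L0 : List RowItem) : List String :=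
  let wsd : PySem.Dict Int RowItem :=
    (PySem.List.enumerate L0 0).foldl
      (fun d p => if PySem.Int.mod p.1 2 = 0 then d.insert (p.1 + 1) p.2 else d.insert (p.1 - 1) p.2)
      PySem.Dict.empty
  (PySem.List.pyRange 0 ((wsd.size : Int) + 1) 1).foldl
    (fun acc c =>
      match wsd.get? c with
      | some (.inr l) => acc ++ l          -- `type(...) is list` → extend
      | some (.inl s) => acc ++ [s]        -- otherwise → append
      | none => acc)                        -- `count in words_sub_dict` false
    []

-- fuel bounds the recursion depth (words_list.length + 1 always suffices: each recursive
-- argument is a strict sublist of the tokens); with fuel 0 the port returns []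
def rowAuxA : Nat → List String → List String
  | 0, _ => []
  | fuel + 1, ws =>
    let st := ws.foldl (rowStepA (rowAuxA fuel)) (PySem.Dict.empty, 0, "", "")
    -- `words_sub_list[0]` (KeyError when absent: outside Pre_)
    rowEmitA ((st.1.get? 0).getD [])

def recursive_order_words_py (words_list : List String) : List String :=
  rowAuxA (words_list.length + 1) words_list

-- ===== PORT B =====

-- Source B `_swap_pairs`: the two-at-a-time while loop, as structural recursion on the remaining list
def swapPairsB {α : Type} : List α → List α
  | a :: b :: r => b :: a :: swapPairsB r
  | xs => xs

-- Source B `_flatten_pairs`: pairwise swap, then the append/extend loop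
def rowFlatPairs (l : List RowItem) : List String :=
  (swapPairsB l).foldl
    (fun acc it =>
      match it with
      | Sum.inl s => acc ++ [s]
      | Sum.inr w => acc ++ w)
    []

-- the loop body of B on the stack of frames; the head of the list is the top of the stack
def rowStepB (st : List (List RowItem)) (w : String) : List (List RowItem) :=
  if w = "(" then [] :: st
  else if w = ")" then
    match st with
    | f :: p :: r => (p ++ [Sum.inr (rowFlatPairs f)]) :: r
    | s => s          -- Python: stack.pop() then stack[-1] raises IndexError (stray ')'): outside Pre_
  else
    match st with
    | f :: r => (f ++ [Sum.inl w]) :: r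
    | [] => []        -- unreachable: the Python stack is nonempty here whenever it did not raise

def recursive_order_words_py_alt (words_list : List String) : List String :=
  let st := words_list.foldl rowStepB [[]]
  rowFlatPairs ((st.getLast?).getD [])   -- Python `stack[0]`: the bottom frame (stack is nonempty)

-- ===== PRECONDITION & SPEC =====

-- Syntactic scanner states for Pre_: `top pg` = at top level, `g0 pg` = group just opened and still
-- empty, `g1` = inside a nonempty un-nested group, `nest d M` = nesting reached depth ≥ 2, current
-- depth d, M = deepest level at which a non-'(' token has appeared (A keeps a buffer per level and
-- indexes it without setdefault on '(' and ')', so '(' below an untouched level raises KeyError);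
-- pg = whether some group was already completed (A's level-1 buffer exists).
inductive RowSt : Type
  | top (pg : Bool)
  | g0 (pg : Bool)
  | g1
  | nest (d M : Nat)
deriving DecidableEq, Repr

def rowScan (seen : Bool) (st : RowSt) : List String → Bool
  | [] => seen
  | w :: r =>
    match st with
    | .top pg =>
      if w = "(" then rowScan seen (.g0 pg) r
      else if w = ")" then false
      else rowScan true (.top pg) r
    | .g0 pg =>
      if w = "(" then (if pg then rowScan seen (.nest 2 1) r else false)
      else if w = ")" then false
      else rowScan seen .g1 r
    | .g1 =>
      if w = "(" then rowScan seen (.nest 2 1) r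
      else if w = ")" then rowScan true (.top true) r
      else rowScan seen .g1 r
    | .nest d M =>
      if w = "(" then (if d ≤ M then rowScan seen (.nest (d + 1) M) r else false)
      else if w = ")" then (if 2 ≤ d then rowScan seen (.nest (d - 1) M) r else false)
      else rowScan seen (.nest d (max M d)) r

-- Pre_ is exactly the set of inputs on which the Python A returns a value: no ')' at top level, no
-- empty '()' group or depth-≥2 nesting ever closed back to the top level, no '(' at a depth whose
-- buffer does not yet exist, and at least one completed top-level token (A raises KeyError /
-- IndexError / TypeError on every excluded input, so nothing A returns on is excluded).
def Pre_recursive_order_words_py (words_list : List String) : Prop :=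
  rowScan false (.top false) words_list = true

instance (words_list : List String) : Decidable (Pre_recursive_order_words_py words_list) := by
  unfold Pre_recursive_order_words_py; infer_instance

def pvWitness_recursive_order_words_py : List String :=
  ["a", "AND", "(", "b", "OR", "c", ")"]

def Spec_recursive_order_words_py (words_list : List String) (out : List String) : Prop := out = recursive_order_words_py_alt words_list
instance (words_list : List String) (out : List String) : Decidable (Spec_recursive_order_words_py words_list out) := by unfold Spec_recursive_order_words_py; infer_instance

-- ===== CLAIM (what is proved, stated in full; the proofs are below) =====
def Claim_equal_recursive_order_words_py : Prop := ∀ (words_list : List String), Dom_recursive_order_words_py words_list → Pre_recursive_order_words_py words_list → Spec_recursive_order_words_py words_list (recursive_order_words_py words_list)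

-- ===== LEMMAS AND PROOFS =====

def rowFlat1 : RowItem → List String
  | .inl s => [s]
  | .inr l => l

-- the key under which enumerate index i is stored in words_sub_dict
def rowKey (i : Int) : Int := if PySem.Int.mod i 2 = 0 then i + 1 else i - 1

def rowItems (L : List RowItem) (s : Int) : List (Int × RowItem) :=
  (PySem.List.enumerate L s).map (fun p => (rowKey p.1, p.2))

def rowG (d : PySem.Dict Int RowItem) (c : Int) : List String :=
  match d.get? c with
  | some (.inr l) => l
  | some (.inl s) => [s]
  | none => []

lemma rowKey_inj : Function.Injective rowKey := by
  intro a b h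
  simp only [rowKey, PySem.Int.mod_eq_emod_of_pos (a := a) (by omega : (0:Int) < 2),
    PySem.Int.mod_eq_emod_of_pos (a := b) (by omega : (0:Int) < 2)] at h
  split_ifs at h <;> omega

lemma rowKey_add_two (i : Int) : rowKey (i + 2) = rowKey i + 2 := by
  have h2 : (0:Int) < 2 := by omega
  simp only [rowKey, PySem.Int.mod_eq_emod_of_pos (a := i + 2) h2,
    PySem.Int.mod_eq_emod_of_pos (a := i) h2]
  have : (i + 2) % 2 = i % 2 := by omega
  rw [this]; split_ifs <;> omega

lemma rowItems_shift (L : List RowItem) (s : Int) :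
    rowItems L (s + 2) = (rowItems L s).map (fun q => (q.1 + 2, q.2)) := by
  induction L generalizing s with
  | nil => simp [rowItems]
  | cons x xs ih =>
    simp only [rowItems, PySem.List.enumerate_cons, List.map_cons] at *
    refine congrArg₂ _ (by rw [rowKey_add_two]) ?_
    have := ih (s + 1)
    simpa [rowItems, add_assoc, add_comm, add_left_comm] using this

lemma get?_mk_map_shift (l : List (Int × RowItem)) (c : Int) :
    (PySem.Dict.mk (l.map (fun q => (q.1 + 2, q.2)))).get? c = (PySem.Dict.mk l).get? (c - 2) := by
  induction l with
  | nil => rfl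
  | cons p l ih =>
    have hbeq : (p.1 + 2 == c) = (p.1 == c - 2) := by
      by_cases h : p.1 + 2 = c
      · simp [show p.1 = c - 2 by omega]
      · simp [h, show ¬ p.1 = c - 2 by omega]
    rw [List.map_cons, PySem.Dict.get?_mk_cons, PySem.Dict.get?_mk_cons, hbeq, ih]

lemma rowEmitA_eq_flatMap (L : List RowItem) :
    rowEmitA L = (PySem.List.pyRange 0 ((L.length : Int) + 1) 1).flatMap
      (rowG (PySem.Dict.mk (rowItems L 0))) := by
  have hbody : (fun (d : PySem.Dict Int RowItem) (p : Int × RowItem) =>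
      if PySem.Int.mod p.1 2 = 0 then d.insert (p.1 + 1) p.2 else d.insert (p.1 - 1) p.2)
      = fun d p => d.insert (rowKey p.1) p.2 := by
    funext d p; simp only [rowKey]; split_ifs <;> rfl
  have hnodup : ((PySem.List.enumerate L 0).map (fun p => rowKey p.1)).Nodup := by
    have : (PySem.List.enumerate L 0).map (fun p => rowKey p.1)
        = ((PySem.List.enumerate L 0).map (·.1)).map rowKey := by
      simp [List.map_map, Function.comp]
    rw [this, PySem.List.map_fst_enumerate]
    exact (PySem.List.nodup_pyRange_one _ _).map rowKey_inj
  have hdict : (PySem.List.enumerate L 0).foldl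
      (fun d p => if PySem.Int.mod p.1 2 = 0 then d.insert (p.1 + 1) p.2 else d.insert (p.1 - 1) p.2)
      PySem.Dict.empty = PySem.Dict.mk (rowItems L 0) := by
    rw [hbody]
    apply PySem.Dict.ext
    rw [PySem.Dict.items_foldl_insert_fresh _ _ _ _ (by simp) hnodup]
    simp [rowItems, PySem.Dict.empty]
  have hsize : (PySem.Dict.mk (rowItems L 0)).size = L.length := by
    simp [PySem.Dict.size, rowItems]
  rw [rowEmitA]
  simp only [hdict, hsize]
  have hfold : ∀ (R : List Int) (acc : List String),
      R.foldl (fun acc c =>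
        match (PySem.Dict.mk (rowItems L 0)).get? c with
        | some (.inr l) => acc ++ l
        | some (.inl s) => acc ++ [s]
        | none => acc) acc = acc ++ R.flatMap (rowG (PySem.Dict.mk (rowItems L 0))) := by
    intro R
    induction R with
    | nil => simp
    | cons c R ih =>
      intro acc
      simp only [List.foldl_cons, List.flatMap_cons, ih, rowG]
      cases h : (PySem.Dict.mk (rowItems L 0)).get? c with
      | none => simp
      | some v => cases v <;> simp
  rw [hfold, List.nil_append]

lemma pyRange_shift2 (n : Int) (hn : 0 ≤ n) :
    PySem.List.pyRange 2 (n + 3) 1 = (PySem.List.pyRange 0 (n + 1) 1).map (· + 2) := by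
  rw [PySem.List.pyRange_one, PySem.List.pyRange_one]
  have : (n + 3 - 2).toNat = (n + 1 - 0).toNat := by omega
  rw [this, List.map_map]
  exact List.map_congr_left (fun k _ => by simp; omega)

lemma rowEmitA_flat : ∀ (L : List RowItem),
    rowEmitA L = (swapPairsB L).flatMap rowFlat1
  | [] => by rfl
  | [x] => by
    rw [rowEmitA_eq_flatMap]
    have hr : PySem.List.pyRange 0 ((1 : Int) + 1) 1 = [0, 1] := by decide
    simp only [List.length_cons, List.length_nil, Nat.cast_zero, Nat.cast_succ, zero_add] at *
    rw [hr]
    have h0 : rowKey 0 = 1 := by decide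
    simp only [rowItems, PySem.List.enumerate_cons, PySem.List.enumerate_nil, List.map_cons,
      List.map_nil, h0]
    cases x <;> simp [rowG, PySem.Dict.get?, swapPairsB, rowFlat1]
  | a :: b :: r => by
    have ih := rowEmitA_flat r
    rw [rowEmitA_eq_flatMap]
    have hk0 : rowKey 0 = 1 := by decide
    have hk1 : rowKey 1 = 0 := by decide
    have h2 : rowItems r 2 = (rowItems r 0).map (fun q => (q.1 + 2, q.2)) := by
      simpa using rowItems_shift r 0
    have hitems : rowItems (a :: b :: r) 0
        = (1, a) :: (0, b) :: (rowItems r 0).map (fun q => (q.1 + 2, q.2)) := by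
      simp only [rowItems, PySem.List.enumerate_cons, List.map_cons, zero_add] at *
      norm_num [hk0, hk1]
      rw [← List.map_map]; exact h2
    rw [hitems]
    set d := PySem.Dict.mk ((1, a) :: (0, b) :: (rowItems r 0).map (fun q => (q.1 + 2, q.2))) with hd
    have hn : (0:Int) ≤ (r.length : Int) := by positivity
    have hlen : (((a :: b :: r).length : Int) + 1) = (r.length : Int) + 3 := by
      simp [List.length_cons]; ring
    rw [hlen]
    have hsplit : PySem.List.pyRange 0 ((r.length : Int) + 3) 1
        = 0 :: 1 :: PySem.List.pyRange 2 ((r.length : Int) + 3) 1 := by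
      rw [PySem.List.pyRange_one_cons (by omega), PySem.List.pyRange_one_cons (by omega)]
      norm_num
    rw [hsplit, pyRange_shift2 _ hn]
    simp only [List.flatMap_cons, List.flatMap_map]
    have hg0 : rowG d 0 = rowFlat1 b := by
      cases b <;> simp [rowG, hd, PySem.Dict.get?_mk_cons, rowFlat1]
    have hg1 : rowG d 1 = rowFlat1 a := by
      cases a <;> simp [rowG, hd, PySem.Dict.get?_mk_cons, rowFlat1]
    have hgc : ∀ c ∈ PySem.List.pyRange 0 ((r.length : Int) + 1) 1,
        rowG d (c + 2) = rowG (PySem.Dict.mk (rowItems r 0)) c := by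
      intro c hc
      have hc0 : 0 ≤ c := ((PySem.List.mem_pyRange_one).1 hc).1
      have e1 : ((1 : Int) == c + 2) = false := by simp; omega
      have e2 : ((0 : Int) == c + 2) = false := by simp; omega
      simp only [rowG, hd, PySem.Dict.get?_mk_cons, e1, e2, if_false, Bool.false_eq_true,
        get?_mk_map_shift, add_sub_cancel_right]
    rw [List.flatMap_congr hgc]
    rw [← rowEmitA_eq_flatMap r, ih, hg0, hg1]
    simp [swapPairsB, rowFlat1]

lemma swapPairsB_map {α β : Type} (f : α → β) : ∀ (l : List α),
    swapPairsB (l.map f) = (swapPairsB l).map f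
  | [] => by rfl
  | [x] => by rfl
  | a :: b :: r => by simp [swapPairsB, swapPairsB_map f r]

lemma rowFlatFold : ∀ (l : List RowItem) (acc : List String),
    l.foldl (fun acc it => match it with
      | Sum.inl s => acc ++ [s]
      | Sum.inr w => acc ++ w) acc = acc ++ l.flatMap rowFlat1 := by
  intro l
  induction l with
  | nil => simp
  | cons it l ih => intro acc; cases it <;> simp [rowFlat1, ih]

lemma rowFlatPairs_eq (l : List RowItem) :
    rowFlatPairs l = (swapPairsB l).flatMap rowFlat1 := by
  rw [rowFlatPairs, rowFlatFold, List.nil_append]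

lemma rowFlatPairs_plain (g : List String) :
    rowFlatPairs (g.map Sum.inl) = swapPairsB g := by
  rw [rowFlatPairs_eq, swapPairsB_map]
  simp [List.flatMap_map, rowFlat1]

lemma plain_fold (rec : List String → List String) :
    ∀ (g : List String) (d : PySem.Dict Int (List RowItem)) (op lop : String),
    (∀ w ∈ g, w ≠ "(" ∧ w ≠ ")") →
    (((g.foldl (rowStepA rec) (d, 0, op, lop)).1.get? 0).getD [])
      = ((d.get? 0).getD []) ++ g.map Sum.inl := by
  intro g
  induction g with
  | nil => intro d op lop _; simp
  | cons w g ih =>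
    intro d op lop hp
    obtain ⟨⟨hw1, hw2⟩, hp'⟩ := List.forall_mem_cons.1 hp
    simp only [List.foldl_cons, rowStepA, hw1, hw2, if_false]
    rw [ih _ _ _ hp']
    simp [rowDappend, PySem.Dict.get?_insert_self]

lemma rowAuxA_plain (fuel : Nat) (g : List String)
    (hp : ∀ w ∈ g, w ≠ "(" ∧ w ≠ ")") :
    rowAuxA (fuel + 1) g = swapPairsB g := by
  rw [rowAuxA]
  rw [plain_fold _ _ _ _ _ hp]
  simp only [PySem.Dict.get?_empty, Option.getD_none, List.nil_append]
  rw [rowEmitA_flat, swapPairsB_map]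
  simp [List.flatMap_map, rowFlat1]

-- A's parenthesis counter for each scanner state
def rowPc : RowSt → Int
  | .top _ => 0
  | .g0 _ => 1
  | .g1 => 1
  | .nest d _ => (d : Int)

-- the simulation invariant tying A's dict state to B's stack, per scanner state
def rowRel (st : RowSt) (dA : PySem.Dict Int (List RowItem))
    (sB : List (List RowItem)) (items : List RowItem) : Prop :=
  ((dA.get? 0).getD []) = items ∧
  match st with
  | .top _ => sB = [items] ∧ ((dA.get? 1).getD []) = []
  | .g0 _ | .g1 => ∃ g : List String, ((dA.get? 1).getD []) = g.map Sum.inl ∧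
      sB = [g.map Sum.inl, items] ∧ (∀ w ∈ g, w ≠ "(" ∧ w ≠ ")")
  | .nest d _ => 1 ≤ d ∧ sB.length = d + 1 ∧ ((sB.getLast?).getD []) = items

lemma rowDappend_get?_ne (d : PySem.Dict Int (List RowItem)) (k j : Int) (v : RowItem)
    (h : k ≠ j) : (rowDappend d k v).get? j = d.get? j := by
  simp only [rowDappend, PySem.Dict.get?_insert]
  split_ifs with hj
  · exact absurd hj.symm h
  · rfl

lemma row_sim : ∀ (ws : List String) (seen : Bool) (st : RowSt) (fuel : Nat)
    (dA : PySem.Dict Int (List RowItem)) (op lop : String)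
    (sB : List (List RowItem)) (items : List RowItem),
    rowScan seen st ws = true → 1 ≤ fuel →
    rowRel st dA sB items →
    (((ws.foldl (rowStepA (rowAuxA fuel)) (dA, rowPc st, op, lop)).1.get? 0).getD [])
      = (((ws.foldl rowStepB sB).getLast?).getD []) := by
  intro ws
  induction ws with
  | nil =>
    intro seen st fuel dA op lop sB items _ _ hrel
    obtain ⟨h0, hrest⟩ := hrel
    cases st with
    | top pg => obtain ⟨hsB, -⟩ := hrest; simp [hsB, h0]
    | g0 pg => obtain ⟨g, -, hsB, -⟩ := hrest; simp [hsB, h0]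
    | g1 => obtain ⟨g, -, hsB, -⟩ := hrest; simp [hsB, h0]
    | nest d M => obtain ⟨-, -, hlast⟩ := hrest; simp [h0, hlast]
  | cons w rest ih =>
    intro seen st fuel dA op lop sB items hscan hfuel hrel
    obtain ⟨h0, hrest⟩ := hrel
    simp only [List.foldl_cons]
    by_cases hw1 : w = "("
    · cases st with
      | top pg =>
        obtain ⟨hsB, h1⟩ := hrest
        simp [rowScan, hw1] at hscan
        have hA : rowStepA (rowAuxA fuel) (dA, rowPc (.top pg), op, lop) w
            = (dA, 1, op, lop) := by simp [rowStepA, rowPc, hw1]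
        have hB : rowStepB sB w = [] :: sB := by simp [rowStepB, hw1]
        rw [hA, hB, hsB]
        have hres := ih seen (.g0 pg) fuel dA op lop [[], items] items hscan hfuel
          ⟨h0, [], by simpa using h1, rfl, by simp⟩
        simpa [rowPc] using hres
      | g0 pg =>
        obtain ⟨g, h1, hsB, hplain⟩ := hrest
        simp [rowScan, hw1] at hscan
        obtain ⟨hpg, hscan⟩ : pg = true ∧ rowScan seen (.nest 2 1) rest = true := by
          cases pg <;> simp_all
        have hA : rowStepA (rowAuxA fuel) (dA, rowPc (.g0 pg), op, lop) w
            = (rowDappend dA 1 (.inl w), 2, op, lop) := by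
          simp [rowStepA, rowPc, hw1]
        have hB : rowStepB sB w = [] :: sB := by simp [rowStepB, hw1]
        rw [hA, hB, hsB]
        have hres := ih seen (.nest 2 1) fuel (rowDappend dA 1 (.inl w)) op lop
          ([] :: [g.map Sum.inl, items]) items hscan hfuel
          ⟨by rw [rowDappend_get?_ne _ _ _ _ (by omega)]; exact h0,
           by omega, by simp, by simp⟩
        simpa [rowPc] using hres
      | g1 =>
        obtain ⟨g, h1, hsB, hplain⟩ := hrest
        simp [rowScan, hw1] at hscan
        have hA : rowStepA (rowAuxA fuel) (dA, rowPc .g1, op, lop) w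
            = (rowDappend dA 1 (.inl w), 2, op, lop) := by
          simp [rowStepA, rowPc, hw1]
        have hB : rowStepB sB w = [] :: sB := by simp [rowStepB, hw1]
        rw [hA, hB, hsB]
        have hres := ih seen (.nest 2 1) fuel (rowDappend dA 1 (.inl w)) op lop
          ([] :: [g.map Sum.inl, items]) items hscan hfuel
          ⟨by rw [rowDappend_get?_ne _ _ _ _ (by omega)]; exact h0,
           by omega, by simp, by simp⟩
        simpa [rowPc] using hres
      | nest d M =>
        obtain ⟨hd1, hlen, hlast⟩ := hrest
        by_cases hdM : d ≤ M
        · simp [rowScan, hw1, hdM] at hscan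
          have hpc : (0 : Int) < (d : Int) := by exact_mod_cast hd1
          have hA : rowStepA (rowAuxA fuel) (dA, rowPc (.nest d M), op, lop) w
              = (rowDappend dA (d : Int) (.inl w), (d : Int) + 1, op, lop) := by
            simp [rowStepA, rowPc, hw1, hpc]
            intro h; exact absurd h (by omega)
          have hB : rowStepB sB w = [] :: sB := by simp [rowStepB, hw1]
          obtain ⟨x, sB', rfl⟩ : ∃ x sB', sB = x :: sB' := by
            cases sB with
            | nil => simp at hlen
            | cons x t => exact ⟨x, t, rfl⟩
          rw [hA, hB]
          have hres := ih seen (.nest (d + 1) M) fuel (rowDappend dA (d : Int) (.inl w)) op lop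
            ([] :: x :: sB') items hscan hfuel
            ⟨by rw [rowDappend_get?_ne _ _ _ _ (by omega)]; exact h0,
             by omega, by simp at hlen ⊢; omega,
             by rw [List.getLast?_cons_cons]; exact hlast⟩
          simpa [rowPc, Nat.cast_add] using hres
        · simp [rowScan, hw1, hdM] at hscan
    · by_cases hw2 : w = ")"
      · cases st with
        | top pg => simp [rowScan, hw1, hw2] at hscan
        | g0 pg => simp [rowScan, hw1, hw2] at hscan
        | g1 =>
          obtain ⟨g, h1, hsB, hplain⟩ := hrest
          simp [rowScan, hw1, hw2] at hscan
          obtain ⟨f, rfl⟩ : ∃ f, fuel = f + 1 := ⟨fuel - 1, by omega⟩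
          have hA : rowStepA (rowAuxA (f + 1)) (dA, rowPc .g1, op, lop) w
              = ((rowDappend dA 0 (.inr (rowAuxA (f + 1)
                  (((dA.get? 1).getD []).map rowItemStr)))).insert 1 [], 0, op, "") := by
            simp [rowStepA, rowPc, hw1, hw2]
          have hsub : (((dA.get? 1).getD []).map rowItemStr) = g := by
            rw [h1, List.map_map]
            exact List.map_id'' (fun x => rfl) _
          have hAg : rowAuxA (f + 1) (((dA.get? 1).getD []).map rowItemStr) = swapPairsB g := by
            rw [hsub]; exact rowAuxA_plain f g hplain
          have hB : rowStepB sB w = [items ++ [Sum.inr (swapPairsB g)]] := by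
            rw [hsB]; simp [rowStepB, hw1, hw2, rowFlatPairs_plain]
          rw [hA, hB, hAg]
          set dA' := (rowDappend dA 0 (Sum.inr (swapPairsB g))).insert 1 [] with hdA'
          have h0' : ((dA'.get? 0).getD []) = items ++ [Sum.inr (swapPairsB g)] := by
            rw [hdA', PySem.Dict.get?_insert]
            simp only [show ((0 : Int) = 1) = False by simp, if_false]
            simp [rowDappend, PySem.Dict.get?_insert_self, h0]
          have h1' : ((dA'.get? 1).getD []) = [] := by
            rw [hdA', PySem.Dict.get?_insert]; simp
          have hres := ih true (.top true) (f + 1) dA' op ""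
            [items ++ [Sum.inr (swapPairsB g)]] (items ++ [Sum.inr (swapPairsB g)])
            hscan (by omega) ⟨h0', rfl, h1'⟩
          simpa [rowPc] using hres
        | nest d M =>
          obtain ⟨hd1, hlen, hlast⟩ := hrest
          by_cases hd2 : 2 ≤ d
          · simp [rowScan, hw1, hw2, hd2] at hscan
            have hpc : (0 : Int) < (d : Int) - 1 := by
              have : (2 : Int) ≤ (d : Int) := by exact_mod_cast hd2
              omega
            have hA : rowStepA (rowAuxA fuel) (dA, rowPc (.nest d M), op, lop) w
                = (rowDappend dA ((d : Int) - 1) (.inl w), (d : Int) - 1, op, lop) := by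
              simp [rowStepA, rowPc, hw1, hw2, hpc]
              intro h; exact absurd h (by omega)
            obtain ⟨f0, p0, r0, r', rfl⟩ : ∃ f0 p0 r0 r', sB = f0 :: p0 :: r0 :: r' := by
              match sB, hlen with
              | f0 :: p0 :: r0 :: r', _ => exact ⟨f0, p0, r0, r', rfl⟩
              | [], h => simp at h
              | [f0], h => simp at h; omega
              | [f0, p0], h => simp at h; omega
            have hB : rowStepB (f0 :: p0 :: r0 :: r') w
                = (p0 ++ [Sum.inr (rowFlatPairs f0)]) :: r0 :: r' := by
              simp [rowStepB, hw1, hw2]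
            rw [hA, hB]
            have hres := ih seen (.nest (d - 1) M) fuel
              (rowDappend dA ((d : Int) - 1) (.inl w)) op lop
              ((p0 ++ [Sum.inr (rowFlatPairs f0)]) :: r0 :: r') items hscan hfuel
              ⟨by rw [rowDappend_get?_ne _ _ _ _ (by omega)]; exact h0,
               by omega, by simp at hlen ⊢; omega,
               by rw [List.getLast?_cons_cons]
                  rw [List.getLast?_cons_cons, List.getLast?_cons_cons] at hlast
                  exact hlast⟩
            have hcast : ((d - 1 : Nat) : Int) = (d : Int) - 1 := by omega
            simpa [rowPc, hcast] using hres
          · simp [rowScan, hw1, hw2, hd2] at hscan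
      · -- a plain word
        cases st with
        | top pg =>
          obtain ⟨hsB, h1⟩ := hrest
          simp [rowScan, hw1, hw2] at hscan
          have hA : rowStepA (rowAuxA fuel) (dA, rowPc (.top pg), op, lop) w
              = (rowDappend dA 0 (.inl w), 0,
                 if w = "AND" ∨ w = "OR" then w else op, lop) := by
            simp [rowStepA, rowPc, hw1, hw2]
          have hB : rowStepB sB w = [items ++ [Sum.inl w]] := by
            rw [hsB]; simp [rowStepB, hw1, hw2]
          rw [hA, hB]
          have hres := ih true (.top pg) fuel (rowDappend dA 0 (.inl w))
            (if w = "AND" ∨ w = "OR" then w else op) lop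
            [items ++ [Sum.inl w]] (items ++ [Sum.inl w]) hscan hfuel
            ⟨by simp [rowDappend, PySem.Dict.get?_insert_self, h0], rfl,
             by rw [rowDappend_get?_ne _ _ _ _ (by omega)]; exact h1⟩
          simpa [rowPc] using hres
        | g0 pg =>
          obtain ⟨g, h1, hsB, hplain⟩ := hrest
          simp [rowScan, hw1, hw2] at hscan
          have hA : rowStepA (rowAuxA fuel) (dA, rowPc (.g0 pg), op, lop) w
              = (rowDappend dA 1 (.inl w), 1,
                 if w = "AND" ∨ w = "OR" then w else op, lop) := by
            simp [rowStepA, rowPc, hw1, hw2]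
          have hB : rowStepB sB w = [(g ++ [w]).map Sum.inl, items] := by
            rw [hsB]; simp [rowStepB, hw1, hw2]
          rw [hA, hB]
          have hres := ih seen .g1 fuel (rowDappend dA 1 (.inl w))
            (if w = "AND" ∨ w = "OR" then w else op) lop
            [(g ++ [w]).map Sum.inl, items] items hscan hfuel
            ⟨by rw [rowDappend_get?_ne _ _ _ _ (by omega)]; exact h0,
             g ++ [w],
             by simp [rowDappend, PySem.Dict.get?_insert_self, h1],
             rfl,
             by intro x hx
                rcases (by simpa using hx : x ∈ g ∨ x = w) with h | h
                · exact hplain x h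
                · subst h; exact ⟨hw1, hw2⟩⟩
          simpa [rowPc] using hres
        | g1 =>
          obtain ⟨g, h1, hsB, hplain⟩ := hrest
          simp [rowScan, hw1, hw2] at hscan
          have hA : rowStepA (rowAuxA fuel) (dA, rowPc .g1, op, lop) w
              = (rowDappend dA 1 (.inl w), 1,
                 if w = "AND" ∨ w = "OR" then w else op, lop) := by
            simp [rowStepA, rowPc, hw1, hw2]
          have hB : rowStepB sB w = [(g ++ [w]).map Sum.inl, items] := by
            rw [hsB]; simp [rowStepB, hw1, hw2]
          rw [hA, hB]
          have hres := ih seen .g1 fuel (rowDappend dA 1 (.inl w))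
            (if w = "AND" ∨ w = "OR" then w else op) lop
            [(g ++ [w]).map Sum.inl, items] items hscan hfuel
            ⟨by rw [rowDappend_get?_ne _ _ _ _ (by omega)]; exact h0,
             g ++ [w],
             by simp [rowDappend, PySem.Dict.get?_insert_self, h1],
             rfl,
             by intro x hx
                rcases (by simpa using hx : x ∈ g ∨ x = w) with h | h
                · exact hplain x h
                · subst h; exact ⟨hw1, hw2⟩⟩
          simpa [rowPc] using hres
        | nest d M =>
          obtain ⟨hd1, hlen, hlast⟩ := hrest
          simp [rowScan, hw1, hw2] at hscan
          have hpc : ((d : Int) = 0) = False := by simp; omega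
          have hA : rowStepA (rowAuxA fuel) (dA, rowPc (.nest d M), op, lop) w
              = (rowDappend dA (d : Int) (.inl w), (d : Int),
                 if w = "AND" ∨ w = "OR" then w else op, lop) := by
            simp [rowStepA, rowPc, hw1, hw2]
          obtain ⟨x, x2, sB', rfl⟩ : ∃ x x2 sB', sB = x :: x2 :: sB' := by
            match sB, hlen with
            | x :: x2 :: sB', _ => exact ⟨x, x2, sB', rfl⟩
            | [], h => simp at h
            | [x], h => simp at h; omega
          have hB : rowStepB (x :: x2 :: sB') w = (x ++ [Sum.inl w]) :: x2 :: sB' := by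
            simp [rowStepB, hw1, hw2]
          rw [hA, hB]
          have hres := ih seen (.nest d (max M d)) fuel (rowDappend dA (d : Int) (.inl w))
            (if w = "AND" ∨ w = "OR" then w else op) lop
            ((x ++ [Sum.inl w]) :: x2 :: sB') items hscan hfuel
            ⟨by rw [rowDappend_get?_ne _ _ _ _ (by omega)]; exact h0,
             hd1, by simp at hlen ⊢; omega,
             by rw [List.getLast?_cons_cons]
                rw [List.getLast?_cons_cons] at hlast
                exact hlast⟩
          simpa [rowPc] using hres

-- ===== VERDICT (by name: the statement is the Claim_ definition above) =====
theorem recursive_order_words_py_spec : Claim_equal_recursive_order_words_py := by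
  intro ws _ hpre
  have hne : ws ≠ [] := by
    intro h; subst h; exact absurd hpre (by decide)
  have hlen : 1 ≤ ws.length := List.length_pos_iff.mpr hne
  unfold Spec_recursive_order_words_py
  rw [recursive_order_words_py, recursive_order_words_py_alt, rowAuxA]
  have h := row_sim ws false (.top false) (ws.length) PySem.Dict.empty "" "" [[]] []
    hpre hlen (by refine ⟨by simp, by simp, by simp⟩)
  simp only [rowPc] at h
  rw [h, rowEmitA_flat, rowFlatPairs_eq]
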